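-- pv_equiv track=rewrite | github.com/alilotfi90/My-solutions-to-coding-challenge-problems | strassen.py | combine_matrix
-- ===== SOURCE A (Python) =====
-- def combine_matrix(A11, A12, A21, A22):
--     n = len(A11)
--     combined = [[0 for _ in range(2 * n)] for _ in range(2 * n)]
--
--     for i in range(n):
--         for j in range(n):
--             combined[i][j] = A11[i][j]
--             combined[i][j + n] = A12[i][j]
--             combined[i + n][j] = A21[i][j]
--             combined[i + n][j + n] = A22[i][j]
--
--     return combined
-- ===== SOURCE B (Python) =====
-- def combine_matrix(A11, A12, A21, A22):
--     n = len(A11)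
--     top = [A11[i][:n] + A12[i][:n] for i in range(n)]
--     bottom = [A21[i][:n] + A22[i][:n] for i in range(n)]
--     return top + bottom
-- ===== Notes on version B (the rewrite author's own statement) =====
-- stated objective: simpler
-- what changed: Builds the block matrix row by row as list concatenations of the n-column quadrant rows (top half then bottom half) instead of preallocating a 2n x 2n zero matrix and filling it cell by cell with index arithmetic.
import Mathlib
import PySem

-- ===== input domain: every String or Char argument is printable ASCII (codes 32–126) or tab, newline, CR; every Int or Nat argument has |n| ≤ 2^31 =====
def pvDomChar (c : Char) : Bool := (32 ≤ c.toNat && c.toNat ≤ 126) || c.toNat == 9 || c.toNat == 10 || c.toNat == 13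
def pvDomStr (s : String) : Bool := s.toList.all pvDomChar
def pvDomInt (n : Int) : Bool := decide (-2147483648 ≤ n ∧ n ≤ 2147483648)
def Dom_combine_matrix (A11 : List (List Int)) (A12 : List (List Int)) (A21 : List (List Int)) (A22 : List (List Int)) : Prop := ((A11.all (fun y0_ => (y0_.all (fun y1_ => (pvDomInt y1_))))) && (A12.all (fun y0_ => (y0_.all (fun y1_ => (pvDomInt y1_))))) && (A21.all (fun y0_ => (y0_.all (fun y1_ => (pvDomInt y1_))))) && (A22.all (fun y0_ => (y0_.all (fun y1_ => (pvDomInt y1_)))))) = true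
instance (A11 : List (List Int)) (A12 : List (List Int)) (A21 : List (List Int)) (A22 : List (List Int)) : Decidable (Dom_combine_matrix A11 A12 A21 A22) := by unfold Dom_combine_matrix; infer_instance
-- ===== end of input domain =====

-- B builds the block matrix row by row (quadrant-row concatenation) instead of filling a
-- preallocated 2n×2n zero matrix cell by cell: simpler decomposition, same O(n^2) cost.

-- ===== PORT A =====
-- combined[i][j] = v  (row i and column j are always in range in A's loop, so List.set/getD are exact)
def pvSet2 (m : List (List Int)) (i j : Int) (v : Int) : List (List Int) :=
  PySem.List.pySetD m i (PySem.List.pySetD (PySem.List.pyGetD m i []) j v)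

-- M[i][j] (in range under Pre_; Python raises exactly where pyGetD would default, excluded by Pre_)
def pvAt (M : List (List Int)) (i j : Int) : Int :=
  PySem.List.pyGetD (PySem.List.pyGetD M i []) j 0

def combine_matrix (A11 : List (List Int)) (A12 : List (List Int)) (A21 : List (List Int)) (A22 : List (List Int)) : List (List Int) :=
  let n : Int := A11.length
  let combined : List (List Int) :=
    List.replicate (2 * A11.length) (List.replicate (2 * A11.length) (0 : Int))
  (PySem.List.pyRange 0 n 1).foldl (fun c i =>
    (PySem.List.pyRange 0 n 1).foldl (fun c j =>
      let c := pvSet2 c i j (pvAt A11 i j)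
      let c := pvSet2 c i (j + n) (pvAt A12 i j)
      let c := pvSet2 c (i + n) j (pvAt A21 i j)
      pvSet2 c (i + n) (j + n) (pvAt A22 i j)) c) combined

-- ===== PORT B =====
def combine_matrix_alt (A11 : List (List Int)) (A12 : List (List Int)) (A21 : List (List Int)) (A22 : List (List Int)) : List (List Int) :=
  let n : Int := A11.length
  let top := (PySem.List.pyRange 0 n 1).map (fun i =>
    PySem.List.slice (PySem.List.pyGetD A11 i []) none (some n) ++
    PySem.List.slice (PySem.List.pyGetD A12 i []) none (some n))
  let bottom := (PySem.List.pyRange 0 n 1).map (fun i =>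
    PySem.List.slice (PySem.List.pyGetD A21 i []) none (some n) ++
    PySem.List.slice (PySem.List.pyGetD A22 i []) none (some n))
  top ++ bottom

-- ===== PRECONDITION & SPEC =====
-- Pre_ holds exactly where A returns (no IndexError): each quadrant has at least n = len(A11)
-- rows available where accessed, and each accessed row has at least n entries.
def Pre_combine_matrix (A11 : List (List Int)) (A12 : List (List Int)) (A21 : List (List Int)) (A22 : List (List Int)) : Prop :=
  A11.length ≤ A12.length ∧ A11.length ≤ A21.length ∧ A11.length ≤ A22.length ∧
  (∀ r ∈ A11, A11.length ≤ r.length) ∧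
  (∀ r ∈ A12.take A11.length, A11.length ≤ r.length) ∧
  (∀ r ∈ A21.take A11.length, A11.length ≤ r.length) ∧
  (∀ r ∈ A22.take A11.length, A11.length ≤ r.length)
instance (A11 : List (List Int)) (A12 : List (List Int)) (A21 : List (List Int)) (A22 : List (List Int)) : Decidable (Pre_combine_matrix A11 A12 A21 A22) := by unfold Pre_combine_matrix; infer_instance

def pvWitness_combine_matrix : List (List Int) × List (List Int) × List (List Int) × List (List Int) :=
  ([[1, 2], [3, 4]], [[5, 6], [7, 8]], [[9, 10], [11, 12]], [[13, 14], [15, 16]])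

def Spec_combine_matrix (A11 : List (List Int)) (A12 : List (List Int)) (A21 : List (List Int)) (A22 : List (List Int)) (out : List (List Int)) : Prop := out = combine_matrix_alt A11 A12 A21 A22
instance (A11 : List (List Int)) (A12 : List (List Int)) (A21 : List (List Int)) (A22 : List (List Int)) (out : List (List Int)) : Decidable (Spec_combine_matrix A11 A12 A21 A22 out) := by unfold Spec_combine_matrix; infer_instance

-- ===== CLAIM (what is proved, stated in full; the proofs are below) =====
def Claim_equal_combine_matrix : Prop := ∀ (A11 : List (List Int)) (A12 : List (List Int)) (A21 : List (List Int)) (A22 : List (List Int)), Dom_combine_matrix A11 A12 A21 A22 → Pre_combine_matrix A11 A12 A21 A22 → Spec_combine_matrix A11 A12 A21 A22 (combine_matrix A11 A12 A21 A22)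


-- ===== LEMMAS AND PROOFS =====

-- Nat-level building blocks shared by both characterisations
def pvNSet2 (m : List (List Int)) (i j : Nat) (v : Int) : List (List Int) :=
  m.set i ((m.getD i []).set j v)

def pvRow (X Y : List (List Int)) (n i : Nat) : List Int :=
  (X.getD i []).take n ++ (Y.getD i []).take n

def pvStep (A11 A12 A21 A22 : List (List Int)) (n : Nat) (c : List (List Int)) (i j : Nat) : List (List Int) :=
  pvNSet2 (pvNSet2 (pvNSet2 (pvNSet2 c i j ((A11.getD i []).getD j 0))
    i (j + n) ((A12.getD i []).getD j 0))
    (i + n) j ((A21.getD i []).getD j 0))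
    (i + n) (j + n) ((A22.getD i []).getD j 0)

lemma combine_matrix_eq_nat (A11 A12 A21 A22 : List (List Int)) :
    combine_matrix A11 A12 A21 A22 =
      (List.range A11.length).foldl (fun c i =>
        (List.range A11.length).foldl (fun c j => pvStep A11 A12 A21 A22 A11.length c i j) c)
        (List.replicate (2 * A11.length) (List.replicate (2 * A11.length) (0 : Int))) := by
  simp only [combine_matrix, PySem.List.pyRange_one, Int.sub_zero, Int.toNat_natCast,
    List.foldl_map, zero_add, pvAt]
  refine PySem.List.foldl_congr_mem _ _ _ _ (fun acc i _ =>
    PySem.List.foldl_congr_mem _ _ _ _ (fun acc' j _ => by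
      simp only [pvStep, pvNSet2, pvSet2, ← Nat.cast_add, PySem.List.pySetD_natCast,
        PySem.List.pyGetD_natCast]))

lemma combine_matrix_alt_eq_nat (A11 A12 A21 A22 : List (List Int)) :
    combine_matrix_alt A11 A12 A21 A22 =
      (List.range A11.length).map (pvRow A11 A12 A11.length) ++
      (List.range A11.length).map (pvRow A21 A22 A11.length) := by
  simp only [combine_matrix_alt, PySem.List.pyRange_one, Int.sub_zero, Int.toNat_natCast,
    List.map_map, zero_add]
  congr 1 <;>
    exact List.map_congr_left (fun k _ => by
      simp [Function.comp, pvRow, List.getD, PySem.List.pyGetD_natCast, PySem.List.slice_to_natCast])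

-- getD after set (row read-back)
lemma pvGetD_set_self (xs : List (List Int)) (i : Nat) (r : List Int) (h : i < xs.length) :
    (xs.set i r).getD i [] = r := by
  simp [List.getD, h]

lemma pvGetD_set_ne (xs : List (List Int)) (i : Nat) (r : List Int) (j : Nat) (h : i ≠ j) :
    (xs.set i r).getD j [] = xs.getD j [] := by
  simp [List.getD, List.getElem?_set_ne h]

-- one Python assignment 'combined[i][j] = v' on a two-row normal form
lemma pvNSet2_row1 (c : List (List Int)) (X Y : List Int) (i m j : Nat) (v : Int)
    (hne : i ≠ m) (hi : i < c.length) :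
    pvNSet2 ((c.set i X).set m Y) i j v = (c.set i (X.set j v)).set m Y := by
  unfold pvNSet2
  rw [pvGetD_set_ne _ _ _ _ (Ne.symm hne), pvGetD_set_self _ _ _ (by simpa using hi),
    List.set_comm _ _ (Ne.symm hne), List.set_set]

lemma pvNSet2_row2 (c : List (List Int)) (X Y : List Int) (i m j : Nat) (v : Int)
    (hm : m < c.length) :
    pvNSet2 ((c.set i X).set m Y) m j v = (c.set i X).set m (Y.set j v) := by
  unfold pvNSet2
  rw [pvGetD_set_self _ _ _ (by simpa using hm), List.set_set]

-- partially filled row: first k entries of a, zeros, first k entries of b, zeros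
def pvFill (a b : List Int) (n k : Nat) : List Int :=
  (a.take k ++ List.replicate (n - k) 0) ++ (b.take k ++ List.replicate (n - k) 0)

lemma pvFill_zero (a b : List Int) (n : Nat) :
    pvFill a b n 0 = List.replicate (2 * n) 0 := by
  rw [two_mul, List.replicate_add]; simp [pvFill]

lemma pvFill_full (a b : List Int) (n : Nat) :
    pvFill a b n n = a.take n ++ b.take n := by
  simp [pvFill]

lemma pvFill_succ (a b : List Int) (n k : Nat) (hk : k < n) (ha : n ≤ a.length) (hb : n ≤ b.length) :
    ((pvFill a b n k).set k (a.getD k 0)).set (k + n) (b.getD k 0) = pvFill a b n (k + 1) := by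
  rw [List.getD_eq_getElem a 0 (by omega), List.getD_eq_getElem b 0 (by omega)]
  apply List.ext_getElem
  · simp [pvFill]; omega
  intro idx h1 h2
  simp only [pvFill, List.getElem_set, List.getElem_append, List.getElem_take,
    List.getElem_replicate, List.length_append, List.length_take, List.length_replicate,
    Nat.min_eq_left (show k ≤ a.length by omega), Nat.min_eq_left (show k ≤ b.length by omega),
    Nat.min_eq_left (show k + 1 ≤ a.length by omega), Nat.min_eq_left (show k + 1 ≤ b.length by omega)]
  split_ifs <;> (try omega) <;>
    exact getElem_congr rfl (by omega) (by simp_all [pvFill]; omega)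

-- inner loop over j: fills row i from (a, b) and row i+n from (a', b')
lemma inner_inv (a b a' b' : List Int) (n : Nat) (c : List (List Int))
    (hc : c.length = 2 * n) (i : Nat) (hi : i < n)
    (hci : c.getD i [] = List.replicate (2 * n) 0)
    (hci' : c.getD (i + n) [] = List.replicate (2 * n) 0)
    (ha : n ≤ a.length) (hb : n ≤ b.length) (ha' : n ≤ a'.length) (hb' : n ≤ b'.length)
    (k : Nat) (hk : k ≤ n) :
    (List.range k).foldl (fun c j =>
        pvNSet2 (pvNSet2 (pvNSet2 (pvNSet2 c i j (a.getD j 0))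
          i (j + n) (b.getD j 0)) (i + n) j (a'.getD j 0)) (i + n) (j + n) (b'.getD j 0)) c =
      (c.set i (pvFill a b n k)).set (i + n) (pvFill a' b' n k) := by
  revert hk
  induction k with
  | zero =>
    intro _
    have t1 : c.set i (pvFill a b n 0) = c := by
      rw [pvFill_zero, ← hci, List.getD_eq_getElem c [] (by omega)]
      exact List.set_getElem_self (by omega)
    have t2 : c.set (i + n) (pvFill a' b' n 0) = c := by
      rw [pvFill_zero, ← hci', List.getD_eq_getElem c [] (by omega)]
      exact List.set_getElem_self (by omega)
    rw [List.range_zero, List.foldl_nil, t1, t2]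
  | succ k ih =>
    intro hk1
    rw [List.range_succ, List.foldl_append, ih (by omega), List.foldl_cons, List.foldl_nil]
    rw [pvNSet2_row1 _ _ _ _ _ _ _ (by omega) (by omega),
      pvNSet2_row1 _ _ _ _ _ _ _ (by omega) (by omega),
      pvNSet2_row2 _ _ _ _ _ _ _ (by simpa using (by omega : i + n < c.length)),
      pvNSet2_row2 _ _ _ _ _ _ _ (by simpa using (by omega : i + n < c.length)),
      pvFill_succ a b n k (by omega) ha hb, pvFill_succ a' b' n k (by omega) ha' hb']

-- the block matrix after m outer iterations
lemma mat_getD_top (f g : Nat → List Int) (z : List Int) (n m : Nat) (hm : m < n) :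
    (((List.range m).map f ++ List.replicate (n - m) z) ++
      ((List.range m).map g ++ List.replicate (n - m) z)).getD m [] = z := by
  rw [List.getD_eq_getElem _ _ (by simp; omega)]
  simp only [List.getElem_append, List.length_append, List.length_map, List.length_range,
    List.length_replicate, List.getElem_replicate]
  split_ifs <;> (try omega) <;> rfl

lemma mat_getD_bot (f g : Nat → List Int) (z : List Int) (n m : Nat) (hm : m < n) :
    (((List.range m).map f ++ List.replicate (n - m) z) ++
      ((List.range m).map g ++ List.replicate (n - m) z)).getD (m + n) [] = z := by
  rw [List.getD_eq_getElem _ _ (by simp; omega)]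
  simp only [List.getElem_append, List.length_append, List.length_map, List.length_range,
    List.length_replicate, List.getElem_replicate]
  split_ifs <;> (try omega) <;> rfl

lemma mat_succ (f g : Nat → List Int) (z : List Int) (n m : Nat) (hm : m < n) :
    ((((List.range m).map f ++ List.replicate (n - m) z) ++
        ((List.range m).map g ++ List.replicate (n - m) z)).set m (f m)).set (m + n) (g m) =
      ((List.range (m + 1)).map f ++ List.replicate (n - (m + 1)) z) ++
        ((List.range (m + 1)).map g ++ List.replicate (n - (m + 1)) z) := by
  apply List.ext_getElem
  · simp; omega
  intro idx h1 h2
  simp only [List.getElem_set, List.getElem_append, List.length_append, List.length_map,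
    List.length_range, List.length_replicate, List.getElem_replicate, List.getElem_map,
    List.getElem_range]
  split_ifs <;> (try omega) <;> (try rfl) <;> (try (congr 1; omega)) <;> simp_all

-- outer loop over i: after m iterations the first m rows of each half are filled
lemma outer_inv (A11 A12 A21 A22 : List (List Int)) (n : Nat) (hn : n = A11.length)
    (h12 : n ≤ A12.length) (h21 : n ≤ A21.length) (h22 : n ≤ A22.length)
    (r11 : ∀ r ∈ A11, n ≤ r.length) (r12 : ∀ r ∈ A12.take n, n ≤ r.length)
    (r21 : ∀ r ∈ A21.take n, n ≤ r.length) (r22 : ∀ r ∈ A22.take n, n ≤ r.length)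
    (m : Nat) (hm : m ≤ n) :
    (List.range m).foldl (fun c i =>
        (List.range n).foldl (fun c j => pvStep A11 A12 A21 A22 n c i j) c)
      (List.replicate (2 * n) (List.replicate (2 * n) (0 : Int))) =
      ((List.range m).map (pvRow A11 A12 n) ++
          List.replicate (n - m) (List.replicate (2 * n) 0)) ++
        ((List.range m).map (pvRow A21 A22 n) ++
          List.replicate (n - m) (List.replicate (2 * n) 0)) := by
  revert hm
  induction m with
  | zero =>
    intro _
    simp only [List.range_zero, List.foldl_nil, List.map_nil, List.nil_append, Nat.sub_zero]
    rw [List.replicate_append_replicate, ← two_mul]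
  | succ m ih =>
    intro hm1
    have hrowlen : ∀ (X : List (List Int)), n ≤ X.length → (∀ r ∈ X.take n, n ≤ r.length) →
        ∀ i < n, n ≤ (X.getD i []).length := by
      intro X hX hr i hi
      have hiX : i < X.length := by omega
      rw [List.getD_eq_getElem X [] hiX]
      exact hr _ (by rw [← List.getElem_take (xs := X) (j := n) (h := by simp; omega)]; exact List.getElem_mem _)
    have r11' : ∀ r ∈ A11.take n, n ≤ r.length := fun r hr => r11 r (List.mem_of_mem_take hr)
    rw [List.range_succ, List.foldl_append, ih (by omega), List.foldl_cons, List.foldl_nil]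
    simp only [pvStep]
    rw [inner_inv (A11.getD m []) (A12.getD m []) (A21.getD m []) (A22.getD m [])
      n _ (by simp; omega) m (by omega)
      (mat_getD_top _ _ _ _ _ (by omega)) (mat_getD_bot _ _ _ _ _ (by omega))
      (hrowlen A11 (by omega) r11' m (by omega)) (hrowlen A12 h12 r12 m (by omega))
      (hrowlen A21 h21 r21 m (by omega)) (hrowlen A22 h22 r22 m (by omega)) n le_rfl]
    rw [pvFill_full, pvFill_full, ← List.range_succ]
    exact mat_succ (pvRow A11 A12 n) (pvRow A21 A22 n) _ n m (by omega)

-- ===== VERDICT (by name: the statement is the Claim_ definition above) =====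
theorem combine_matrix_spec : Claim_equal_combine_matrix := by
  intro A11 A12 A21 A22 _ hpre
  obtain ⟨h12, h21, h22, r11, r12, r21, r22⟩ := hpre
  unfold Spec_combine_matrix
  rw [combine_matrix_eq_nat, combine_matrix_alt_eq_nat,
    outer_inv A11 A12 A21 A22 A11.length rfl h12 h21 h22 r11 r12 r21 r22 A11.length le_rfl]
  simp
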